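-- pv_equiv track=rewrite | github.com/SongZzi/coding_test | programmers/level1/201225_12917.py | solution
-- ===== SOURCE A (Python) =====
-- def solution(s):
--     answer = []
--
--     for i in range(len(s)):
--         answer.append(s[i])
--
--     answer.sort()
--     answer.reverse()
--     answer = ''.join(answer)
--
--     return answer
-- ===== SOURCE B (Python) =====
-- def solution(s):
--     # Counting sort over the ASCII alphabet, emitted in descending code order.
--     counts = [0] * 128
--     for ch in s:
--         counts[ord(ch)] += 1
--     out = []
--     for code in range(127, -1, -1):
--         out.append(chr(code) * counts[code])
--     return ''.join(out)
-- ===== Notes on version B (the rewrite author's own statement) =====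
-- stated objective: faster
-- what changed: Replaces build-list + comparison sort + reverse with a counting sort over the 128-code ASCII alphabet emitted in descending order.
import Mathlib
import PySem

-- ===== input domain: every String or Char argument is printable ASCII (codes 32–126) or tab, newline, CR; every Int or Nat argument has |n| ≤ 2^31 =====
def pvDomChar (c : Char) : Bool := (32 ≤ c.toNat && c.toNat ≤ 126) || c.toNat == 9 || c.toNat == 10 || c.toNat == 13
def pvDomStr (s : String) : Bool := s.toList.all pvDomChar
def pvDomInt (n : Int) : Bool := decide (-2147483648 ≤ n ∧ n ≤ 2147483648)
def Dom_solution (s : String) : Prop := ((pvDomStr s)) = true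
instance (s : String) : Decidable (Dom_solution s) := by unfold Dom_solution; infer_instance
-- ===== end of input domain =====

-- B replaces build-list + comparison sort + reverse by a counting sort over the 128-code ASCII alphabet emitted in descending order (objective: faster).

-- ===== PORT A =====
-- for i in range(len(s)): answer.append(s[i]);  answer.sort(); answer.reverse(); ''.join(answer)
def solution (s : String) : String :=
  let answer : List Char := (PySem.List.pyRange 0 (PySem.Str.len s) 1).map
    (fun i => PySem.List.pyGetD s.toList i ' ')
  let answer := PySem.List.sorted answer (fun c => c) false
  let answer := answer.reverse
  String.mk answer

-- ===== PORT B =====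
-- counting sort: counts[ord(ch)] += 1 over a 128-slot table, then emit chr(code)*counts[code] for code in range(127,-1,-1)
def solution_alt (s : String) : String :=
  let counts : List Int := s.toList.foldl
    (fun counts ch => counts.set ch.toNat (counts.getD ch.toNat 0 + 1))
    (List.replicate 128 0)
  let out : List (List Char) := (PySem.List.pyRange 127 (-1) (-1)).map
    (fun code => List.replicate (counts.getD code.toNat 0).toNat (Char.ofNat code.toNat))
  String.mk out.flatten

-- ===== PRECONDITION & SPEC =====
def Spec_solution (s : String) (out : String) : Prop := out = solution_alt s
instance (s : String) (out : String) : Decidable (Spec_solution s out) := by unfold Spec_solution; infer_instance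

-- ===== CLAIM (what is proved, stated in full; the proofs are below) =====
def Claim_equal_solution : Prop := ∀ (s : String), Dom_solution s → Spec_solution s (solution s)

-- ===== LEMMAS AND PROOFS =====

-- number of characters of cs whose code is k
def pvCnt (cs : List Char) (k : Nat) : Nat := cs.countP (fun c => c.toNat == k)

-- the ascending counting-sort output
def pvAsc (cs : List Char) : List Char :=
  (List.range 128).flatMap (fun k => List.replicate (pvCnt cs k) (Char.ofNat k))

theorem pvChar_eq_of_toNat_eq {a b : Char} (h : a.toNat = b.toNat) : a = b :=
  Char.ext (UInt32.toNat_inj.mp h)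

theorem pvOfNat_toNat {k : Nat} (h : k < 128) : (Char.ofNat k).toNat = k := by
  have hv : Nat.isValidChar k := Or.inl (by omega)
  simp [Char.ofNat, Char.ofNatAux, dif_pos hv, Char.toNat]

theorem pvCodesLt (s : String) (h : Dom_solution s) : ∀ c ∈ s.toList, c.toNat < 128 := by
  intro c hc
  have := (List.all_eq_true.mp h) c hc
  simp [pvDomChar] at this
  omega

theorem pvSum_zero (g : Nat → Nat) (n : Nat) (h0 : ∀ k < n, g k = 0) :
    ((List.range n).map g).sum = 0 := by
  apply List.sum_eq_zero
  intro x hx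
  rcases List.mem_map.mp hx with ⟨k, hk, rfl⟩
  exact h0 k (List.mem_range.mp hk)

theorem pvSum_single (g : Nat → Nat) (n j : Nat) (hj : j < n)
    (h0 : ∀ k < n, k ≠ j → g k = 0) : ((List.range n).map g).sum = g j := by
  induction n with
  | zero => omega
  | succ n ih =>
    rw [List.range_succ, List.map_append, List.sum_append]
    by_cases hjn : j = n
    · subst hjn
      rw [pvSum_zero g j (fun k hk => h0 k (by omega) (by omega))]
      simp
    · rw [ih (by omega) (fun k hk hk' => h0 k (by omega) hk')]
      have : g n = 0 := h0 n (by omega) (by omega)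
      simp [this]

theorem pvAsc_perm (cs : List Char) (h : ∀ c ∈ cs, c.toNat < 128) : (pvAsc cs).Perm cs := by
  rw [List.perm_iff_count]
  intro a
  rw [pvAsc, List.count_flatMap]
  have hterm : ∀ k : Nat, (List.count a ∘ fun k => List.replicate (pvCnt cs k) (Char.ofNat k)) k
      = if Char.ofNat k = a then pvCnt cs k else 0 := by
    intro k; simp [List.count_replicate]
  by_cases ha : a.toNat < 128
  · have : ((List.range 128).map
        (List.count a ∘ fun k => List.replicate (pvCnt cs k) (Char.ofNat k))).sum
        = pvCnt cs a.toNat := by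
      rw [show (List.count a ∘ fun k => List.replicate (pvCnt cs k) (Char.ofNat k))
            = fun k => if Char.ofNat k = a then pvCnt cs k else 0 from funext hterm]
      rw [pvSum_single _ 128 a.toNat ha]
      · simp [Char.ofNat_toNat]
      · intro k hk hne
        have : ¬ Char.ofNat k = a := by
          intro he
          apply hne
          have := pvOfNat_toNat hk
          rw [he] at this
          omega
        simp [this]
    rw [this, pvCnt, List.count_eq_countP]
    apply List.countP_congr
    intro c hc
    simp only [beq_iff_eq]
    constructor
    · intro hce
      exact pvChar_eq_of_toNat_eq hce
    · intro hce
      rw [hce]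
  · have h1 : ((List.range 128).map
        (List.count a ∘ fun k => List.replicate (pvCnt cs k) (Char.ofNat k))).sum = 0 := by
      rw [show (List.count a ∘ fun k => List.replicate (pvCnt cs k) (Char.ofNat k))
            = fun k => if Char.ofNat k = a then pvCnt cs k else 0 from funext hterm]
      apply pvSum_zero
      intro k hk
      have : ¬ Char.ofNat k = a := by
        intro he
        have := pvOfNat_toNat hk
        rw [he] at this
        omega
      simp [this]
    have h2 : List.count a cs = 0 := by
      rw [List.count_eq_zero]
      intro hmem
      exact ha (h a hmem)
    rw [h1, h2]

theorem pvAsc_pairwise (cs : List Char) : (pvAsc cs).Pairwise (· ≤ ·) := by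
  rw [pvAsc, List.pairwise_flatMap]
  constructor
  · intro k _
    rw [List.pairwise_replicate]
    right; exact le_refl _
  · have hp : (List.range 128).Pairwise
        (fun k1 k2 => k1 ∈ List.range 128 ∧ k2 ∈ List.range 128 ∧ k1 < k2) :=
      List.Pairwise.and_mem.mp List.pairwise_lt_range
    apply hp.imp
    intro k1 k2 ⟨hm1, hm2, hlt⟩ x hx y hy
    rw [List.eq_of_mem_replicate hx, List.eq_of_mem_replicate hy]
    show (Char.ofNat k1).toNat ≤ (Char.ofNat k2).toNat
    rw [pvOfNat_toNat (List.mem_range.mp hm1), pvOfNat_toNat (List.mem_range.mp hm2)]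
    omega

-- the counting fold computes pvCnt
theorem pvFold_counts (cs : List Char) (h : ∀ c ∈ cs, c.toNat < 128) :
    ∀ (L : List Int), L.length = 128 → ∀ k < 128,
      (cs.foldl (fun counts ch => counts.set ch.toNat (counts.getD ch.toNat 0 + 1)) L).getD k 0
        = L.getD k 0 + (pvCnt cs k : Int) := by
  induction cs with
  | nil => intro L _ k _; simp [pvCnt]
  | cons c rest ih =>
    intro L hL k hk
    have hc : c.toNat < 128 := h c List.mem_cons_self
    have hrest : ∀ x ∈ rest, x.toNat < 128 := fun x hx => h x (List.mem_cons_of_mem _ hx)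
    rw [List.foldl_cons]
    rw [ih hrest _ (by simp [hL]) k hk]
    have hset : (L.set c.toNat (L.getD c.toNat 0 + 1)).getD k 0
        = if c.toNat = k then L.getD c.toNat 0 + 1 else L.getD k 0 := by
      rw [List.getD_eq_getElem _ _ (by simp [hL]; omega), List.getElem_set]
      split_ifs with hik
      · rfl
      · exact (List.getD_eq_getElem L 0 (by omega)).symm
    rw [hset]
    simp only [pvCnt, List.countP_cons]
    by_cases hck : c.toNat = k
    · simp [hck]
      ring
    · simp [hck]

theorem pvSolution_alt_eq (s : String) (h : Dom_solution s) :
    solution_alt s = String.mk (pvAsc s.toList).reverse := by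
  have hlt := pvCodesLt s h
  rw [solution_alt]
  have hcounts : ∀ k < 128,
      ((s.toList.foldl (fun counts ch => counts.set ch.toNat (counts.getD ch.toNat 0 + 1))
        (List.replicate 128 (0 : Int))).getD k 0) = (pvCnt s.toList k : Int) := by
    intro k hk
    rw [pvFold_counts s.toList hlt _ (by simp) k hk]
    rw [List.getD_eq_getElem _ _ (by simp only [List.length_replicate]; omega),
        List.getElem_replicate]
    simp
  have hrange : PySem.List.pyRange 127 (-1) (-1)
      = ((List.range 128).map (Int.ofNat)).reverse := by
    rw [PySem.List.pyRange_neg_one_eq_reverse]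
    norm_num
    rw [show ((128 : Int)) = ((128 : Nat) : Int) by norm_num, PySem.List.pyRange_zero_nat]
    rfl
  rw [hrange, List.map_reverse, List.map_map]
  have hmap : ((List.range 128).map
      ((fun code : Int => List.replicate
          (((s.toList.foldl (fun counts ch => counts.set ch.toNat (counts.getD ch.toNat 0 + 1))
            (List.replicate 128 (0 : Int))).getD code.toNat 0)).toNat
          (Char.ofNat code.toNat)) ∘ Int.ofNat))
      = (List.range 128).map (fun k => List.replicate (pvCnt s.toList k) (Char.ofNat k)) := by
    apply List.map_congr_left
    intro k hk
    have hk' := List.mem_range.mp hk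
    simp only [Function.comp]
    rw [show (Int.ofNat k).toNat = k from rfl, hcounts k hk']
    simp
  rw [hmap]
  have hflat : ((List.range 128).map
      (fun k => List.replicate (pvCnt s.toList k) (Char.ofNat k))).reverse.flatten
      = (pvAsc s.toList).reverse := by
    rw [pvAsc, List.flatMap_def, List.reverse_flatten, List.map_map]
    congr 1
    congr 1
    apply List.map_congr_left
    intro k _
    simp
  rw [hflat]

theorem pvSolution_eq (s : String) :
    solution s = String.mk (PySem.List.sorted s.toList (fun c => c) false).reverse := by
  rw [solution]
  simp only [PySem.Str.len_eq]
  rw [PySem.List.map_pyGetD_pyRange_zero']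

-- ===== VERDICT (by name: the statement is the Claim_ definition above) =====
theorem solution_spec : Claim_equal_solution := by
  intro s hdom
  unfold Spec_solution
  rw [pvSolution_eq, pvSolution_alt_eq s hdom]
  congr 1
  congr 1
  exact PySem.List.sorted_id_eq_of_perm_of_pairwise s.toList (pvAsc s.toList)
    (pvAsc_perm s.toList (pvCodesLt s hdom)) (pvAsc_pairwise s.toList)
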